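-- pv_equiv track=rewrite | github.com/kelvinhuang0327/number-pattern-research | tools/backtest_biglotto_enhancements.py | cold_numbers_bet
-- ===== SOURCE A (Python) =====
-- from collections import Counter, defaultdict
--
-- MAX_NUM = 49
--
-- def cold_numbers_bet(history, window=100, exclude=None):
--     exclude = exclude or set()
--     recent = history[-window:] if len(history) >= window else history
--     all_nums = [n for d in recent for n in d['numbers']]
--     freq = Counter(all_nums)
--     candidates = [n for n in range(1, MAX_NUM + 1) if n not in exclude]
--     sorted_cold = sorted(candidates, key=lambda x: freq.get(x, 0))
--     return sorted(sorted_cold[:6])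
-- ===== SOURCE B (Python) =====
-- MAX_NUM = 49
--
-- def cold_numbers_bet(history, window=100, exclude=None):
--     exclude = exclude or set()
--     recent = history[-window:] if len(history) >= window else history
--     freq = {}
--     for d in recent:
--         for n in d['numbers']:
--             freq[n] = freq.get(n, 0) + 1
--     buckets = {}
--     for n in range(1, MAX_NUM + 1):
--         if n not in exclude:
--             buckets.setdefault(freq.get(n, 0), []).append(n)
--     picked = []
--     for f in sorted(buckets):
--         need = 6 - len(picked)
--         if need <= 0:
--             break
--         picked += buckets[f][:need]
--     return sorted(picked)
-- ===== Notes on version B (the rewrite author's own statement) =====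
-- stated objective: alternative
-- what changed: B replaces A's stable comparison sort of the 49 candidates by a bucket pass: it groups candidates into a dict keyed by frequency, walks the distinct frequencies in increasing order taking ascending candidates until 6 are picked, and returns them sorted.
import Mathlib
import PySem

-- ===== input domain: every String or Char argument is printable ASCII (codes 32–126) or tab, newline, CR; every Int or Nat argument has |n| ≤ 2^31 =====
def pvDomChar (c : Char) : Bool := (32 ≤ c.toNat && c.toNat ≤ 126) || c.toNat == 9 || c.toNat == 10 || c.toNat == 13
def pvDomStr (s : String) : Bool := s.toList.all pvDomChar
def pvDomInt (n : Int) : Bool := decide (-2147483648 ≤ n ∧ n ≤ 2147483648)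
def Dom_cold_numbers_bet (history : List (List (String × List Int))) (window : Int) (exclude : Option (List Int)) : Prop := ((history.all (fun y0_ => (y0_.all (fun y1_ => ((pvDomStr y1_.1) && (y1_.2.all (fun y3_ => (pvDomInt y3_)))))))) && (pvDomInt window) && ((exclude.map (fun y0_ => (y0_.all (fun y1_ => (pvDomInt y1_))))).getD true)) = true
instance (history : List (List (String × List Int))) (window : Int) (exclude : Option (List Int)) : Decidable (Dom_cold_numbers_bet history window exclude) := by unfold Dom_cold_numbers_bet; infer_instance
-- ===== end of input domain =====

-- B replaces A's comparison sort of the 49 candidates by a group-by-frequency dict walked in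
-- increasing frequency order, cutting off after 6 picks (objective: alternative decomposition).

-- ===== PORT A =====
def cold_numbers_bet (history : List (List (String × List Int))) (window : Int) (exclude : Option (List Int)) : List Int :=
  let excl : List Int := exclude.getD []
  let recent := if window ≤ (history.length : Int) then PySem.List.slice history (some (-window)) none else history
  let all_nums := recent.flatMap (fun d => (PySem.Dict.mk d).getD "numbers" [])
  let freq := PySem.Dict.counter all_nums
  let candidates := (PySem.List.pyRange 1 (49 + 1) 1).filter (fun n => !(excl.contains n))
  let sorted_cold := PySem.List.sorted candidates (fun x => freq.getD x 0)
  PySem.List.sorted (PySem.List.slice sorted_cold none (some 6)) (fun x => x)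

-- ===== PORT B =====
def cold_numbers_bet_alt (history : List (List (String × List Int))) (window : Int) (exclude : Option (List Int)) : List Int :=
  let excl : List Int := exclude.getD []
  let recent := if window ≤ (history.length : Int) then PySem.List.slice history (some (-window)) none else history
  let freq : PySem.Dict Int Int := recent.foldl (fun fr d => ((PySem.Dict.mk d).getD "numbers" []).foldl (fun fr n => fr.modify n 0 (· + 1)) fr) PySem.Dict.empty
  let buckets := (PySem.List.pyRange 1 (49 + 1) 1).foldl
      (fun b n => if !(excl.contains n) then b.modify (freq.getD n 0) [] (· ++ [n]) else b) PySem.Dict.empty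
  let picked := (PySem.List.sorted buckets.keys (fun x => x)).foldl
      (fun acc f => if 6 - (acc.length : Int) ≤ 0 then acc
                    else acc ++ PySem.List.slice (buckets.getD f []) none (some (6 - (acc.length : Int)))) []
  PySem.List.sorted picked (fun x => x)

-- ===== PRECONDITION & SPEC =====
-- Pre_: every draw dict inside the recent window carries the key 'numbers' (on any other input
-- A raises KeyError at d['numbers']); draws outside the window are unconstrained.
def Pre_cold_numbers_bet (history : List (List (String × List Int))) (window : Int) (exclude : Option (List Int)) : Prop :=
  ∀ d ∈ (if window ≤ (history.length : Int) then PySem.List.slice history (some (-window)) none else history),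
    (PySem.Dict.mk d).contains "numbers" = true
instance (history : List (List (String × List Int))) (window : Int) (exclude : Option (List Int)) : Decidable (Pre_cold_numbers_bet history window exclude) := by unfold Pre_cold_numbers_bet; infer_instance
def pvWitness_cold_numbers_bet : (List (List (String × List Int))) × Int × Option (List Int) :=
  ([[("numbers", [7, 7, 13])], [("numbers", [7])]], 100, some [13])
def Spec_cold_numbers_bet (history : List (List (String × List Int))) (window : Int) (exclude : Option (List Int)) (out : List Int) : Prop := out = cold_numbers_bet_alt history window exclude
instance (history : List (List (String × List Int))) (window : Int) (exclude : Option (List Int)) (out : List Int) : Decidable (Spec_cold_numbers_bet history window exclude out) := by unfold Spec_cold_numbers_bet; infer_instance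

-- ===== CLAIM (what is proved, stated in full; the proofs are below) =====
def Claim_equal_cold_numbers_bet : Prop := ∀ (history : List (List (String × List Int))) (window : Int) (exclude : Option (List Int)), Dom_cold_numbers_bet history window exclude → Pre_cold_numbers_bet history window exclude → Spec_cold_numbers_bet history window exclude (cold_numbers_bet history window exclude)

-- ===== LEMMAS AND PROOFS =====

-- the refined sort key, injective on values 1..49: frequency first, value second
def pvK (key : Int → Int) (n : Int) : Int := key n * 50 + n

theorem pv_insertBy_congr {α : Type} (b1 b2 : α → α → Bool) (x : α) (ys : List α)
    (h : ∀ y ∈ ys, b1 x y = b2 x y) :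
    PySem.List.insertBy b1 x ys = PySem.List.insertBy b2 x ys := by
  induction ys with
  | nil => rfl
  | cons y ys ih =>
    have hy := h y (by simp)
    simp only [PySem.List.insertBy, hy]
    split
    · rfl
    · simp [ih (fun z hz => h z (by simp [hz]))]

theorem pv_foldl_insertBy_key_eq (key : Int → Int) (xs : List Int) :
    ∀ (acc : List Int),
    xs.Pairwise (· < ·) → (∀ x ∈ xs, 1 ≤ x ∧ x ≤ 49) →
    (∀ y ∈ acc, 1 ≤ y ∧ y ≤ 49) → (∀ x ∈ xs, ∀ y ∈ acc, y < x) →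
    xs.foldl (fun acc x => PySem.List.insertBy (fun a b => decide (key a < key b)) x acc) acc
      = xs.foldl (fun acc x => PySem.List.insertBy (fun a b => decide (pvK key a < pvK key b)) x acc) acc := by
  induction xs with
  | nil => intros; rfl
  | cons x xs ih =>
    intro acc hxp hxb hab hlt
    simp only [List.foldl_cons]
    have hins : PySem.List.insertBy (fun a b => decide (key a < key b)) x acc
        = PySem.List.insertBy (fun a b => decide (pvK key a < pvK key b)) x acc := by
      apply pv_insertBy_congr
      intro y hy
      have hyx := hlt x (by simp) y hy
      have hxB := hxb x (by simp)
      have hyB := hab y hy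
      simp only [pvK, decide_eq_decide]
      omega
    rw [hins]
    apply ih
    · exact hxp.of_cons
    · exact fun z hz => hxb z (by simp [hz])
    · intro y hy
      rcases (PySem.List.mem_insertBy _ _ _ _).mp hy with h1 | h1
      · exact h1 ▸ hxb x (by simp)
      · exact hab y h1
    · intro z hz y hy
      rcases (PySem.List.mem_insertBy _ _ _ _).mp hy with h1 | h1
      · exact h1 ▸ (List.pairwise_cons.mp hxp).1 z hz
      · exact hlt z (by simp [hz]) y h1

-- stability: on a strictly increasing list of numbers in [1,49], the stable sort by key
-- coincides with the sort by the tie-free key pvK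
theorem pv_sorted_key_eq_sorted_K (key : Int → Int) (xs : List Int)
    (hxp : xs.Pairwise (· < ·)) (hxb : ∀ x ∈ xs, 1 ≤ x ∧ x ≤ 49) :
    PySem.List.sorted xs key = PySem.List.sorted xs (pvK key) := by
  rw [PySem.List.sorted_eq_foldl_insertBy, PySem.List.sorted_eq_foldl_insertBy]
  exact pv_foldl_insertBy_key_eq key xs [] hxp hxb (by simp) (by simp)

theorem pv_flatMap_congr {α β : Type} (ks : List α) (f g : α → List β)
    (h : ∀ a ∈ ks, f a = g a) : ks.flatMap f = ks.flatMap g := by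
  induction ks with
  | nil => rfl
  | cons k ks ih => simp [List.flatMap_cons, h k (by simp), ih (fun a ha => h a (by simp [ha]))]

theorem pv_flatMap_filter_perm (key : Int → Int) (ks : List Int) :
    ∀ (xs : List Int), ks.Nodup → (∀ x ∈ xs, key x ∈ ks) →
    (ks.flatMap (fun f => xs.filter (fun n => key n == f))).Perm xs := by
  induction ks with
  | nil =>
    intro xs _ hmem
    match xs with
    | [] => simp
    | x :: _ => exact absurd (hmem x (by simp)) (by simp)
  | cons f ks ih =>
    intro xs hnd hmem
    simp only [List.flatMap_cons]
    have hcongr : ks.flatMap (fun g => xs.filter (fun n => key n == g))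
        = ks.flatMap (fun g => (xs.filter (fun n => !(key n == f))).filter (fun n => key n == g)) := by
      apply pv_flatMap_congr
      intro g hg
      have hgf : g ≠ f := by rintro rfl; exact (List.nodup_cons.mp hnd).1 hg
      rw [List.filter_filter]
      apply List.filter_congr
      intro n _
      by_cases hk : key n = g
      · simp [hk, hgf]
      · simp [hk]
    rw [hcongr]
    have hperm := ih (xs.filter (fun n => !(key n == f))) (List.nodup_cons.mp hnd).2
      (by
        intro x hx
        rcases List.mem_filter.mp hx with ⟨hx1, hx2⟩
        have := hmem x hx1
        simp at hx2
        simpa [hx2] using this)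
    exact (hperm.append_left _).trans (List.filter_append_perm _ xs)

-- the crown lemma: a stable sort by frequency is the concatenation of the ascending
-- frequency buckets, each bucket listed in ascending value order
theorem pv_sorted_eq_bucket_flatten (key : Int → Int) (xs : List Int)
    (hxp : xs.Pairwise (· < ·)) (hxb : ∀ x ∈ xs, 1 ≤ x ∧ x ≤ 49) :
    PySem.List.sorted xs key
      = (PySem.List.sorted (PySem.Set.ofList (xs.map key)) (fun x => x)).flatMap
          (fun f => xs.filter (fun n => key n == f)) := by
  set ks := PySem.List.sorted (PySem.Set.ofList (xs.map key)) (fun x => x) with hks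
  have hksp : ks.Pairwise (· < ·) := PySem.List.sorted_ofList_pairwise_lt _
  have hknd : ks.Nodup := (PySem.List.sorted_perm _ _ _).nodup_iff.mpr (PySem.Set.nodup_ofList _)
  have hmem : ∀ x ∈ xs, key x ∈ ks := by
    intro x hx
    rw [hks, PySem.List.mem_sorted, PySem.Set.mem_ofList]
    exact List.mem_map_of_mem hx
  have hperm := pv_flatMap_filter_perm key ks xs hknd hmem
  rw [pv_sorted_key_eq_sorted_K key xs hxp hxb]
  apply PySem.List.sorted_eq_of_perm_of_pairwise_lt _ _ _ hperm
  rw [List.flatMap_def, List.pairwise_flatten]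
  constructor
  · intro l hl
    rcases List.mem_map.mp hl with ⟨f, _, rfl⟩
    have : (xs.filter (fun n => key n == f)).Pairwise (· < ·) := hxp.filter _
    apply this.imp_of_mem
    intro a b ha hb hab
    have hfa := (List.mem_filter.mp ha).2
    have hfb := (List.mem_filter.mp hb).2
    simp only [beq_iff_eq] at hfa hfb
    simp only [pvK]
    omega
  · rw [List.pairwise_map]
    apply hksp.imp_of_mem
    intro f g _ _ hfg x hx y hy
    have hfa := List.mem_filter.mp hx
    have hfb := List.mem_filter.mp hy
    have hbx := hxb x hfa.1
    have hby := hxb y hfb.1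
    simp only [beq_iff_eq] at hfa hfb
    simp only [pvK]
    omega

theorem pv_take_take_append {α : Type} (n : Nat) (l r : List α) :
    (l.take n ++ r).take n = (l ++ r).take n := by
  by_cases hl : l.length ≤ n
  · rw [List.take_of_length_le hl]
  · rw [List.take_append_of_le_length (by simp; omega), List.take_append_of_le_length (by omega),
        List.take_take]
    simp

theorem pv_foldl_take6 (g : Int → List Int) (ks : List Int) (acc : List Int) (h : acc.length ≤ 6) :
    ks.foldl (fun acc f => if 6 - (acc.length : Int) ≤ 0 then acc
                           else acc ++ (g f).take (6 - (acc.length : Int)).toNat) acc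
      = (acc ++ ks.flatMap g).take 6 := by
  induction ks generalizing acc with
  | nil =>
    simp [List.take_of_length_le, h]
  | cons f ks ih =>
    simp only [List.foldl_cons, List.flatMap_cons]
    have h1 : ∀ X : List Int, (acc ++ X).take 6 = acc ++ X.take (6 - acc.length) := by
      intro X
      rw [List.take_append, List.take_of_length_le h]
    by_cases h6 : 6 - (acc.length : Int) ≤ 0
    · have hlen : acc.length = 6 := by omega
      rw [if_pos h6, ih acc h, h1, h1]
      simp [hlen]
    · have hm : (6 - (acc.length : Int)).toNat = 6 - acc.length := by omega
      rw [if_neg h6, hm, ih _ (by simp; omega), List.append_assoc, h1, h1,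
          pv_take_take_append]

theorem pv_main (history : List (List (String × List Int))) (window : Int) (exclude : Option (List Int)) :
    cold_numbers_bet history window exclude = cold_numbers_bet_alt history window exclude := by
  simp only [cold_numbers_bet, cold_numbers_bet_alt]
  set excl : List Int := exclude.getD [] with hexcl
  set R := (if window ≤ (history.length : Int) then PySem.List.slice history (some (-window)) none else history) with hR
  set An := R.flatMap (fun d => (PySem.Dict.mk d).getD "numbers" []) with hA
  have hfreq : R.foldl (fun fr d => ((PySem.Dict.mk d).getD "numbers" []).foldl (fun fr n => fr.modify n 0 (· + 1)) fr) PySem.Dict.empty = PySem.Dict.counter An := by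
    rw [PySem.Dict.counter_eq_foldl, hA, List.foldl_flatMap]
  simp only [hfreq]
  set key : Int → Int := fun n => (PySem.Dict.counter An).getD n 0 with hkey
  set cand := (PySem.List.pyRange 1 (49 + 1) 1).filter (fun n => !(excl.contains n)) with hcand
  have hcp : cand.Pairwise (· < ·) := (PySem.List.pairwise_lt_pyRange_one 1 (49 + 1)).filter _
  have hcb : ∀ x ∈ cand, 1 ≤ x ∧ x ≤ 49 := by
    intro x hx
    have := (PySem.List.mem_pyRange_one).mp (List.mem_of_mem_filter hx)
    omega
  have hbuck : (PySem.List.pyRange 1 (49 + 1) 1).foldl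
      (fun b n => if !(excl.contains n) then b.modify (key n) [] (· ++ [n]) else b) PySem.Dict.empty
      = cand.foldl (fun b n => b.modify (key n) [] (· ++ [n])) PySem.Dict.empty :=
    PySem.List.foldl_if_eq_foldl_filter _ _ _ _
  rw [hbuck]
  set D := cand.foldl (fun b n => b.modify (key n) [] (· ++ [n])) PySem.Dict.empty with hD
  have hkeys : D.keys = PySem.Set.ofList (cand.map key) := by
    have h := PySem.Dict.keys_foldl_modify_key (κ := Int) (ν := List Int) cand key []
      (fun _ n v => v ++ [n]) PySem.Dict.empty
    rw [hD]
    simpa [PySem.Dict.keys_empty, PySem.Set.update_nil_left] using h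
  have hmap : (cand.map (fun n => ((key n : Int), n))).foldl
      (fun (d : PySem.Dict Int (List Int)) p => d.modify p.1 [] (· ++ [p.2])) PySem.Dict.empty
      = cand.foldl (fun b n => b.modify (key n) [] (· ++ [n])) PySem.Dict.empty := by
    rw [List.foldl_map]
  have hget : ∀ f : Int, D.getD f [] = cand.filter (fun n => key n == f) := by
    intro f
    rw [hD, ← hmap, PySem.Dict.getD_foldl_modify_append]
    simp [List.filter_map, List.map_map, Function.comp_def]
  have hpick : (PySem.List.sorted D.keys (fun x => x)).foldl
      (fun acc f => if 6 - (acc.length : Int) ≤ 0 then acc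
                    else acc ++ PySem.List.slice (D.getD f []) none (some (6 - (acc.length : Int)))) []
      = ((PySem.List.sorted (PySem.Set.ofList (cand.map key)) (fun x => x)).flatMap
          (fun f => cand.filter (fun n => key n == f))).take 6 := by
    rw [hkeys]
    rw [PySem.List.foldl_congr_mem _ _
      (fun acc f => if 6 - (acc.length : Int) ≤ 0 then acc
                    else acc ++ (cand.filter (fun n => key n == f)).take (6 - (acc.length : Int)).toNat) _ ?_]
    · rw [pv_foldl_take6 _ _ [] (by simp)]
      simp
    · intro acc f hf
      by_cases h6 : 6 - (acc.length : Int) ≤ 0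
      · simp [h6]
      · simp only [if_neg h6]
        rw [hget f, PySem.List.slice_to (List.filter (fun n => key n == f) cand) (b := 6 - (acc.length : Int)) (by omega)]
  rw [hpick, ← pv_sorted_eq_bucket_flatten key cand hcp hcb,
      PySem.List.slice_to (PySem.List.sorted cand key) (b := 6) (by norm_num)]
  rfl

-- ===== VERDICT (by name: the statement is the Claim_ definition above) =====
theorem cold_numbers_bet_spec : Claim_equal_cold_numbers_bet := by
  intro history window exclude _ _
  unfold Spec_cold_numbers_bet
  exact pv_main history window exclude
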